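-- pv_equiv track=rewrite | github.com/maksymhonchar/Fun | Python/pyworkout/comprehensions/ex28_mod1.py | join_numbers
-- ===== SOURCE A (Python) =====
-- def join_numbers(
--     integers: range,
--     separator: str = ','
-- ) -> str:
--     return separator.join(
--         [
--             str(integer)
--             for integer in integers
--             if 0 <= integer <= 10
--         ]
--     )
-- ===== SOURCE B (Python) =====
-- def join_numbers(integers, separator=','):
--     # Single left-to-right pass with a running string accumulator instead of
--     # building an intermediate list and joining it.
--     out = None
--     for integer in integers:
--         if 0 <= integer <= 10:
--             out = str(integer) if out is None else out + separator + str(integer)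
--     return '' if out is None else out
-- ===== Notes on version B (the rewrite author's own statement) =====
-- stated objective: alternative
-- what changed: B replaces A's filter-comprehension-then-join with a single fold that threads an optional running string, concatenating separator+str(n) as each in-range element is met.
import Mathlib
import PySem

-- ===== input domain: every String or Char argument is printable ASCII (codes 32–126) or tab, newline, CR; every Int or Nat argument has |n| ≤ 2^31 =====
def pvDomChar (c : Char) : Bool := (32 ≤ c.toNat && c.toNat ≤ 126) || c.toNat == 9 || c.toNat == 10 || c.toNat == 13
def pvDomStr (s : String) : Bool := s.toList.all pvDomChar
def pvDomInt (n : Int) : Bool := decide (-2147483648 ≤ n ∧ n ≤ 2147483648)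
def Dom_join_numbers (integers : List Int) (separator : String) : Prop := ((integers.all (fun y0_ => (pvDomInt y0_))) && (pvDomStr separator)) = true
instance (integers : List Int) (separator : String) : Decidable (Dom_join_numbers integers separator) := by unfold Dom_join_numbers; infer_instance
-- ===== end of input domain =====

-- B replaces A's build-a-list-then-join with a single fold over the input that
-- threads an optional running string (objective: alternative decomposition, same cost).


-- ===== PORT A =====
-- separator.join([str(i) for i in integers if 0 <= i <= 10])
def join_numbers (integers : List Int) (separator : String) : String :=
  PySem.Str.join separator
    ((integers.filter (fun integer => decide (0 ≤ integer ∧ integer ≤ 10))).map PySem.Int.toStr)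

-- ===== PORT B =====
-- fold with an Option String accumulator: none = nothing emitted yet
def join_numbers_alt (integers : List Int) (separator : String) : String :=
  match integers.foldl
      (fun out integer =>
        if 0 ≤ integer ∧ integer ≤ 10 then
          some (match out with
            | none => PySem.Int.toStr integer
            | some s => s ++ separator ++ PySem.Int.toStr integer)
        else out)
      none with
  | none => ""
  | some s => s

-- ===== PRECONDITION & SPEC =====
def Spec_join_numbers (integers : List Int) (separator : String) (out : String) : Prop := out = join_numbers_alt integers separator
instance (integers : List Int) (separator : String) (out : String) : Decidable (Spec_join_numbers integers separator out) := by unfold Spec_join_numbers; infer_instance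

-- ===== CLAIM (what is proved, stated in full; the proofs are below) =====
def Claim_equal_join_numbers : Prop := ∀ (integers : List Int) (separator : String), Dom_join_numbers integers separator → Spec_join_numbers integers separator (join_numbers integers separator)

-- ===== LEMMAS AND PROOFS =====

-- prepending a string distributes into the separator-fold
theorem pv_prepend_foldl (sep a : String) :
    ∀ (ys : List String) (y : String),
      a ++ (ys.foldl (fun s t => s ++ sep ++ t) y) = ys.foldl (fun s t => s ++ sep ++ t) (a ++ y) := by
  intro ys
  induction ys with
  | nil => intro y; simp [List.foldl]
  | cons y' ys ih =>
      intro y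
      simp only [List.foldl]
      rw [ih]
      congr 1
      simp [String.append_assoc]

-- Python's sep.join on a nonempty list is the separator-fold
theorem pv_join_cons (sep : String) :
    ∀ (xs : List String) (x : String),
      PySem.Str.join sep (x :: xs) = xs.foldl (fun s t => s ++ sep ++ t) x := by
  intro xs
  induction xs with
  | nil =>
      intro x
      apply String.toList_inj.mp
      simp [PySem.Str.toList_join, PySem.Chars.join_singleton]
  | cons y ys ih =>
      intro x
      have hcc : PySem.Str.join sep (x :: y :: ys) = x ++ sep ++ PySem.Str.join sep (y :: ys) := by
        apply String.toList_inj.mp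
        simp [PySem.Str.toList_join, PySem.Chars.join_cons_cons]
      rw [hcc, ih y]
      simp only [List.foldl]
      rw [String.append_assoc, pv_prepend_foldl, pv_prepend_foldl]
      congr 1
      rw [String.append_assoc]

-- B's fold, started from an already-emitted string
theorem pv_fold_some (sep : String) :
    ∀ (l : List Int) (s : String),
      (l.foldl
        (fun out integer =>
          if 0 ≤ integer ∧ integer ≤ 10 then
            some (match out with
              | none => PySem.Int.toStr integer
              | some s => s ++ sep ++ PySem.Int.toStr integer)
          else out)
        (some s))
      = some (((l.filter (fun i => decide (0 ≤ i ∧ i ≤ 10))).map PySem.Int.toStr).foldl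
          (fun s t => s ++ sep ++ t) s) := by
  intro l
  induction l with
  | nil => intro s; simp
  | cons hd tl ih =>
      intro s
      by_cases h : 0 ≤ hd ∧ hd ≤ 10
      · have hb : decide (0 ≤ hd ∧ hd ≤ 10) = true := decide_eq_true h
        simp only [List.foldl_cons, List.filter_cons, hb, if_pos h, if_true, List.map_cons]
        rw [ih]
      · have hb : decide (0 ≤ hd ∧ hd ≤ 10) = false := decide_eq_false h
        simp only [List.foldl_cons, List.filter_cons, hb, if_neg h]
        rw [ih]
        simp

-- B's fold from none produces the head of the filtered parts and folds the rest
theorem pv_fold_none (sep : String) :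
    ∀ (l : List Int),
      (l.foldl
        (fun out integer =>
          if 0 ≤ integer ∧ integer ≤ 10 then
            some (match out with
              | none => PySem.Int.toStr integer
              | some s => s ++ sep ++ PySem.Int.toStr integer)
          else out)
        none)
      = match (l.filter (fun i => decide (0 ≤ i ∧ i ≤ 10))).map PySem.Int.toStr with
        | [] => none
        | x :: xs => some (xs.foldl (fun s t => s ++ sep ++ t) x) := by
  intro l
  induction l with
  | nil => simp
  | cons hd tl ih =>
      by_cases h : 0 ≤ hd ∧ hd ≤ 10
      · have hb : decide (0 ≤ hd ∧ hd ≤ 10) = true := decide_eq_true h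
        simp only [List.foldl_cons, List.filter_cons, hb, if_pos h, if_true, List.map_cons]
        rw [pv_fold_some]
      · have hb : decide (0 ≤ hd ∧ hd ≤ 10) = false := decide_eq_false h
        simp only [List.foldl_cons, List.filter_cons, hb, if_neg h]
        rw [ih]
        simp

-- ===== VERDICT (by name: the statement is the Claim_ definition above) =====
theorem join_numbers_spec : Claim_equal_join_numbers := by
  intro integers separator _
  unfold Spec_join_numbers join_numbers join_numbers_alt
  rw [pv_fold_none]
  cases hp : (integers.filter (fun i => decide (0 ≤ i ∧ i ≤ 10))).map PySem.Int.toStr with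
  | nil =>
      simp only
      apply String.toList_inj.mp
      simp [PySem.Str.toList_join, PySem.Chars.join_nil]
  | cons x xs =>
      simp only
      exact pv_join_cons separator xs x
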